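-- pv_equiv track=rewrite | github.com/aiondemand/aiondemand | src/aiod/utils/_indexing/_preindex.py | _generate_objs_by_type
-- ===== SOURCE A (Python) =====
-- def _generate_objs_by_type(type_of_objs: dict) -> dict:
--     """
--     Generate _objs_by_type dictionary from _type_of_objs.
--
--     Args:
--         type_of_objs: Dictionary mapping object names to their types.
--                      Types can be strings or lists of strings for polymorphic objects.
--
--     Returns
--     -------
--         Dictionary mapping types to lists of object names.
--     """
--     objs_by_type: dict[str, list[str]] = {}
--
--     for obj_name, obj_types in type_of_objs.items():
--         if isinstance(obj_types, str):
--             obj_types = [obj_types]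
--
--         for obj_type in obj_types:
--             if obj_type not in objs_by_type:
--                 objs_by_type[obj_type] = []
--             objs_by_type[obj_type].append(obj_name)
--
--     return objs_by_type
-- ===== SOURCE B (Python) =====
-- def _generate_objs_by_type(type_of_objs: dict) -> dict:
--     """Invert name->types into type->names: flatten to (type, name) pairs,
--     dedup the type keys in first-occurrence order, then build each bucket
--     with one comprehension over the flat pair list."""
--     pairs = [(t, n) for n, ts in type_of_objs.items()
--              for t in ([ts] if isinstance(ts, str) else ts)]
--     keys = dict.fromkeys(t for t, _ in pairs)
--     return {t: [n for tt, n in pairs if tt == t] for t in keys}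
-- ===== Notes on version B (the rewrite author's own statement) =====
-- stated objective: alternative
-- what changed: A builds the type->names buckets incrementally in one dict pass; B first flattens the input into a (type, name) pair list, deduplicates the type keys in first-occurrence order, and builds each bucket with a comprehension over the flat pair list (trades speed for a declarative shape: one scan of the pairs per distinct type).
import Mathlib
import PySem

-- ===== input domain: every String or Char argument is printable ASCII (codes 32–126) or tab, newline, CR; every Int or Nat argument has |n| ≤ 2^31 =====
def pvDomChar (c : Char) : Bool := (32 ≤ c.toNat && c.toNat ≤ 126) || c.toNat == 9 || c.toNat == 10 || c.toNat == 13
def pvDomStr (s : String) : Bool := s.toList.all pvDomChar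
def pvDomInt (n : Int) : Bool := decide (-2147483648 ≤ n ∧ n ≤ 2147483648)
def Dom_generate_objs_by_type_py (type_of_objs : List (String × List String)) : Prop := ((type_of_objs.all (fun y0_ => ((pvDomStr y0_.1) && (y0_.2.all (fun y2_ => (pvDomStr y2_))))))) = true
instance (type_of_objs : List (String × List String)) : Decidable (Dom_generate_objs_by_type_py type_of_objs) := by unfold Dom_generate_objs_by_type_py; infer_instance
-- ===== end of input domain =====

-- B inverts the map by flattening to (type, name) pairs, deduplicating the keys and building each
-- bucket with one comprehension per key (objective: alternative decomposition; not faster).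


-- ===== PORT A =====
-- for each (obj_name, obj_types): for each obj_type: if absent insert empty bucket, then append obj_name
def generate_objs_by_type_py (type_of_objs : List (String × List String)) : List (String × List String) :=
  (type_of_objs.foldl (fun d p =>
      p.2.foldl (fun d t =>
        let d := if d.contains t then d else d.insert t ([] : List String)
        d.modify t [] (fun l => l ++ [p.1])) d)
    (PySem.Dict.empty : PySem.Dict String (List String))).items

-- ===== PORT B =====
-- flatten to (type, name) pairs; keys = dict.fromkeys of the types; one comprehension per key
def generate_objs_by_type_py_alt (type_of_objs : List (String × List String)) : List (String × List String) :=
  let pairs := type_of_objs.flatMap (fun p => p.2.map (fun t => (t, p.1)))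
  let keys := PySem.List.dedup (pairs.map (·.1))
  keys.map (fun t => (t, (pairs.filter (fun q => q.1 == t)).map (·.2)))

-- ===== PRECONDITION & SPEC =====
def Spec_generate_objs_by_type_py (type_of_objs : List (String × List String)) (out : List (String × List String)) : Prop := out = generate_objs_by_type_py_alt type_of_objs
instance (type_of_objs : List (String × List String)) (out : List (String × List String)) : Decidable (Spec_generate_objs_by_type_py type_of_objs out) := by unfold Spec_generate_objs_by_type_py; infer_instance

-- ===== CLAIM (what is proved, stated in full; the proofs are below) =====
def Claim_equal_generate_objs_by_type_py : Prop := ∀ (type_of_objs : List (String × List String)), Dom_generate_objs_by_type_py type_of_objs → Spec_generate_objs_by_type_py type_of_objs (generate_objs_by_type_py type_of_objs)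

-- ===== LEMMAS AND PROOFS =====

-- A's "insert empty bucket if absent, then append" step is exactly Dict.modify with default []
theorem step_eq_modify (d : PySem.Dict String (List String)) (t n : String) :
    ((if d.contains t then d else d.insert t ([] : List String)).modify t []
        (fun l => l ++ [n]))
      = d.modify t [] (fun l => l ++ [n]) := by
  by_cases h : d.contains t
  · simp [h]
  · have h' : d.contains t = false := by simpa using h
    simp [h', PySem.Dict.modify, PySem.Dict.getD_insert_self,
      PySem.Dict.insert_insert_self,
      PySem.Dict.getD_of_not_contains d ([] : List String) h']

-- A's double fold equals the single fold over the flattened pair list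
theorem fold_flatten (xs : List (String × List String)) :
    (xs.foldl (fun d p =>
        p.2.foldl (fun d t =>
          let d := if d.contains t then d else d.insert t ([] : List String)
          d.modify t [] (fun l => l ++ [p.1])) d)
      (PySem.Dict.empty : PySem.Dict String (List String)))
    = (xs.flatMap (fun p => p.2.map (fun t => (t, p.1)))).foldl
        (fun d q => d.modify q.1 [] (fun l => l ++ [q.2])) PySem.Dict.empty := by
  rw [List.foldl_flatMap]
  congr 1
  funext d p
  rw [List.foldl_map]
  congr 1
  funext d t
  exact step_eq_modify d t p.1

-- ===== VERDICT (by name: the statement is the Claim_ definition above) =====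
theorem generate_objs_by_type_py_spec : Claim_equal_generate_objs_by_type_py := by
  intro xs _
  unfold Spec_generate_objs_by_type_py generate_objs_by_type_py generate_objs_by_type_py_alt
  rw [fold_flatten]
  generalize xs.flatMap (fun p => p.2.map (fun t => (t, p.1))) = pairs
  have hnd : (pairs.foldl (fun d q => d.modify q.1 [] (fun l => l ++ [q.2]))
      (PySem.Dict.empty : PySem.Dict String (List String))).keys.Nodup :=
    PySem.Dict.nodup_keys_foldl_modify_key pairs (fun q => q.1) []
      (fun _ q l => l ++ [q.2]) _ PySem.Dict.nodup_keys_empty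
  have hkeys : (pairs.foldl (fun d q => d.modify q.1 [] (fun l => l ++ [q.2]))
      (PySem.Dict.empty : PySem.Dict String (List String))).keys
      = PySem.Set.ofList (pairs.map (fun q => q.1)) :=
    PySem.Dict.keys_foldl_modify_key pairs (fun q => q.1) []
      (fun _ q l => l ++ [q.2]) PySem.Dict.empty
  rw [PySem.Dict.items_eq_map_keys _ hnd ([] : List String), hkeys]
  simp only [PySem.List.dedup_eq_ofList]
  apply List.map_congr_left
  intro t _
  rw [PySem.Dict.getD_foldl_modify_append, PySem.Dict.getD_empty]
  simp
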